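-- pv_equiv track=rewrite | github.com/JIAQING-XIE/Google_NLP_DL | 9.2/utils/analysis_utils.py | get_single_sentence_lables
-- ===== SOURCE A (Python) =====
-- useful_pos_two_dict = {
--     ('NN', 'JJ'):0, ('JJ', 'NN'):1, ('NN', 'JJR'):2, ('JJR', 'NN'):3, ('NN', 'JJS'):4, ('JJS', 'NN'):5,
--     ('NNS', 'JJ'):6, ('JJ', 'NNS'):7, ('NNS', 'JJR'):8, ('JJR', 'NNS'):9,('NNS', 'JJS'):10,('JJS', 'NNS'):11,
--     ('NNP', 'JJ'):12, ('JJ', 'NNP'):13, ('NNP', 'JJR'):14, ('JJR', 'NNP'):15, ('NNP', 'JJS'):16, ('JJS', 'NNP'):17,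
--     ('NNPS', 'JJ'):18, ('JJ', 'NNPS'):19, ('NNPS', 'JJR'):20, ('JJR', 'NNPS'):21, ('NNPS', 'JJS'):22, ('JJS', 'NNPS'):23,
--     ('IN', 'JJ'):24, ('JJ', 'IN'):25, ('IN', 'JJR'):26, ('JJR', 'IN'):27, ('IN', 'JJS'):28,('JJS', 'IN'):29,
--     ('DT', 'JJ'):30, ('JJ', 'DT'):31, ('DT', 'JJR'):32, ('JJR', 'DT'):33, ('DT', 'JJS'):34, ('JJS', 'DT'):35,
--                   }
--
-- def get_single_sentence_lables(text_tk,aspect_vocab,dependency,pos):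
--     labels = []
--     indexs = []
--     for i, tk in enumerate(text_tk):
--         if tk in aspect_vocab:##如果是aspect词典中的词
--             for dep in dependency[1:]: #dep为连边 (连边类型,index1,index2)
--                 if dep[1] == i + 1 or dep[2] == i + 1: #找到与当前词有连边的
--                     pos_two = (pos[dep[1] - 1][1], pos[dep[2] - 1][1])
--                     if pos_two in useful_pos_two_dict:
--                         if dep[1] == i + 1: #保证是aspect+opinon的顺序
--                             labels.append(text_tk[dep[1] - 1] + ' ' + text_tk[dep[2] - 1])
--                         else:
--                             labels.append(text_tk[dep[2] - 1] + ' ' + text_tk[dep[1] - 1])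
--                         current_index = [dep[1] - 1, dep[2] - 1]
--                         current_index.sort()
--                         indexs.append(current_index)
--     return labels,indexs
-- ===== SOURCE B (Python) =====
-- useful_pos_two_dict = {
--     ('NN', 'JJ'):0, ('JJ', 'NN'):1, ('NN', 'JJR'):2, ('JJR', 'NN'):3, ('NN', 'JJS'):4, ('JJS', 'NN'):5,
--     ('NNS', 'JJ'):6, ('JJ', 'NNS'):7, ('NNS', 'JJR'):8, ('JJR', 'NNS'):9,('NNS', 'JJS'):10,('JJS', 'NNS'):11,
--     ('NNP', 'JJ'):12, ('JJ', 'NNP'):13, ('NNP', 'JJR'):14, ('JJR', 'NNP'):15, ('NNP', 'JJS'):16, ('JJS', 'NNP'):17,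
--     ('NNPS', 'JJ'):18, ('JJ', 'NNPS'):19, ('NNPS', 'JJR'):20, ('JJR', 'NNPS'):21, ('NNPS', 'JJS'):22, ('JJS', 'NNPS'):23,
--     ('IN', 'JJ'):24, ('JJ', 'IN'):25, ('IN', 'JJR'):26, ('JJR', 'IN'):27, ('IN', 'JJS'):28,('JJS', 'IN'):29,
--     ('DT', 'JJ'):30, ('JJ', 'DT'):31, ('DT', 'JJR'):32, ('JJR', 'DT'):33, ('DT', 'JJS'):34, ('JJS', 'DT'):35,
--                   }
--
-- def get_single_sentence_lables(text_tk, aspect_vocab, dependency, pos):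
--     # index the dependency edges (skipping the first, as the original does) by endpoint node,
--     # so each aspect token only looks at its incident edges
--     incidences = []
--     for dep in dependency[1:]:
--         incidences.append((dep[1], dep))
--         if dep[2] != dep[1]:
--             incidences.append((dep[2], dep))
--     adj = {}
--     for node, dep in incidences:
--         adj.setdefault(node, []).append(dep)
--     aspect_set = set(aspect_vocab)
--     labels = []
--     indexs = []
--     for i, tk in enumerate(text_tk):
--         if tk in aspect_set:
--             for dep in adj.get(i + 1, []):
--                 pos_two = (pos[dep[1] - 1][1], pos[dep[2] - 1][1])
--                 if pos_two in useful_pos_two_dict: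
--                     if dep[1] == i + 1:
--                         labels.append(text_tk[dep[1] - 1] + ' ' + text_tk[dep[2] - 1])
--                     else:
--                         labels.append(text_tk[dep[2] - 1] + ' ' + text_tk[dep[1] - 1])
--                     a, b = dep[1] - 1, dep[2] - 1
--                     indexs.append([a, b] if a <= b else [b, a])
--     return labels, indexs
-- ===== Notes on version B (the rewrite author's own statement) =====
-- stated objective: faster
-- what changed: B builds a dict indexing the dependency edges by endpoint node and a set of the aspect vocabulary once, then iterates per aspect token only over its incident edges, instead of A's rescan of the whole dependency list (and linear vocabulary-list membership test) for every token.
import Mathlib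
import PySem

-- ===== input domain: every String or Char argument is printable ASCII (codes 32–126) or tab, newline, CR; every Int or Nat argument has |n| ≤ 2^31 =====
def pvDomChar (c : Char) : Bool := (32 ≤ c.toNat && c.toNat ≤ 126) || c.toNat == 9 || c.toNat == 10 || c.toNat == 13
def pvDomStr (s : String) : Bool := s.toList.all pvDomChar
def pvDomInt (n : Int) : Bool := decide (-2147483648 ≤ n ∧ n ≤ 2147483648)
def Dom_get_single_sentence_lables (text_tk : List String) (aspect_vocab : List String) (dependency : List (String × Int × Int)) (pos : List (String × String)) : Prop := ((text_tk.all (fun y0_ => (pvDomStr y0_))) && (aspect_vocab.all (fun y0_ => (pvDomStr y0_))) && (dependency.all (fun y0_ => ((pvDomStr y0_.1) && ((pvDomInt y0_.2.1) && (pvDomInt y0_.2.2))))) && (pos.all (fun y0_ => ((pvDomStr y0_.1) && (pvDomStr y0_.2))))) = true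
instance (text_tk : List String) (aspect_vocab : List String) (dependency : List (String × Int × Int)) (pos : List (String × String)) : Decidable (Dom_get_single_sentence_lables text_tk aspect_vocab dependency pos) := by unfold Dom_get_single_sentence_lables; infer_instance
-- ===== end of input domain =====

-- B indexes the dependency edges by endpoint node in a dict and iterates, per aspect token, only its
-- incident edges instead of rescanning the whole dependency list (objective: faster).

-- shared module-level constant of Source A (only its key set is ever used)
def useful_pos_two_dict : PySem.Dict (String × String) Int := PySem.Dict.ofList [
  (("NN", "JJ"), 0), (("JJ", "NN"), 1), (("NN", "JJR"), 2), (("JJR", "NN"), 3), (("NN", "JJS"), 4), (("JJS", "NN"), 5),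
  (("NNS", "JJ"), 6), (("JJ", "NNS"), 7), (("NNS", "JJR"), 8), (("JJR", "NNS"), 9), (("NNS", "JJS"), 10), (("JJS", "NNS"), 11),
  (("NNP", "JJ"), 12), (("JJ", "NNP"), 13), (("NNP", "JJR"), 14), (("JJR", "NNP"), 15), (("NNP", "JJS"), 16), (("JJS", "NNP"), 17),
  (("NNPS", "JJ"), 18), (("JJ", "NNPS"), 19), (("NNPS", "JJR"), 20), (("JJR", "NNPS"), 21), (("NNPS", "JJS"), 22), (("JJS", "NNPS"), 23),
  (("IN", "JJ"), 24), (("JJ", "IN"), 25), (("IN", "JJR"), 26), (("JJR", "IN"), 27), (("IN", "JJS"), 28), (("JJS", "IN"), 29),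
  (("DT", "JJ"), 30), (("JJ", "DT"), 31), (("DT", "JJR"), 32), (("JJR", "DT"), 33), (("DT", "JJS"), 34), (("JJS", "DT"), 35)]

-- ===== PORT A =====
-- dependency[1:] is List.drop 1; xs[k] is pyGetD (Pre_ keeps every reached index in range);
-- current_index.sort() is PySem.List.sorted
def get_single_sentence_lables (text_tk : List String) (aspect_vocab : List String) (dependency : List (String × Int × Int)) (pos : List (String × String)) : List String × List (List Int) :=
  (PySem.List.enumerate text_tk 0).foldl (fun (s : List String × List (List Int)) p =>
    if aspect_vocab.contains p.2 then
      (dependency.drop 1).foldl (fun s dep =>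
        if dep.2.1 == p.1 + 1 || dep.2.2 == p.1 + 1 then
          let pos_two := ((PySem.List.pyGetD pos (dep.2.1 - 1) ("", "")).2,
                          (PySem.List.pyGetD pos (dep.2.2 - 1) ("", "")).2)
          if useful_pos_two_dict.contains pos_two then
            let labels :=
              if dep.2.1 == p.1 + 1 then
                s.1 ++ [PySem.List.pyGetD text_tk (dep.2.1 - 1) "" ++ " " ++ PySem.List.pyGetD text_tk (dep.2.2 - 1) ""]
              else
                s.1 ++ [PySem.List.pyGetD text_tk (dep.2.2 - 1) "" ++ " " ++ PySem.List.pyGetD text_tk (dep.2.1 - 1) ""]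
            let current_index := PySem.List.sorted [dep.2.1 - 1, dep.2.2 - 1] (fun x => x) false
            (labels, s.2 ++ [current_index])
          else s
        else s) s
    else s) ([], [])

-- ===== PORT B =====
-- the (node, edge) incidence pairs of dependency[1:] (each edge once per distinct endpoint)
def gssl_incidences (dependency : List (String × Int × Int)) : List (Int × (String × Int × Int)) :=
  (dependency.drop 1).foldl (fun acc dep =>
    let acc := acc ++ [(dep.2.1, dep)]
    if dep.2.2 ≠ dep.2.1 then acc ++ [(dep.2.2, dep)] else acc) []

-- adj.setdefault(node, []).append(dep)  ==  adj[node] = adj.get(node, []) + [dep]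
def gssl_adj (dependency : List (String × Int × Int)) : PySem.Dict Int (List (String × Int × Int)) :=
  (gssl_incidences dependency).foldl (fun d q => d.modify q.1 [] (· ++ [q.2])) PySem.Dict.empty

def get_single_sentence_lables_alt (text_tk : List String) (aspect_vocab : List String) (dependency : List (String × Int × Int)) (pos : List (String × String)) : List String × List (List Int) :=
  (PySem.List.enumerate text_tk 0).foldl (fun (s : List String × List (List Int)) p =>
    if (PySem.Set.ofList aspect_vocab).contains p.2 then
      ((gssl_adj dependency).getD (p.1 + 1) []).foldl (fun s dep =>
        let pos_two := ((PySem.List.pyGetD pos (dep.2.1 - 1) ("", "")).2,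
                        (PySem.List.pyGetD pos (dep.2.2 - 1) ("", "")).2)
        if useful_pos_two_dict.contains pos_two then
          let labels :=
            if dep.2.1 == p.1 + 1 then
              s.1 ++ [PySem.List.pyGetD text_tk (dep.2.1 - 1) "" ++ " " ++ PySem.List.pyGetD text_tk (dep.2.2 - 1) ""]
            else
              s.1 ++ [PySem.List.pyGetD text_tk (dep.2.2 - 1) "" ++ " " ++ PySem.List.pyGetD text_tk (dep.2.1 - 1) ""]
          let a := dep.2.1 - 1
          let b := dep.2.2 - 1
          (labels, s.2 ++ [if a ≤ b then [a, b] else [b, a]])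
        else s) s
    else s) ([], [])

-- ===== PRECONDITION & SPEC =====
-- Pre_ excludes exactly the inputs on which the Python A raises IndexError: a dependency edge (after the
-- first) incident to some aspect token whose endpoints index pos out of range, or (when the POS pair is
-- in the dict) index text_tk out of range.
def Pre_get_single_sentence_lables (text_tk : List String) (aspect_vocab : List String) (dependency : List (String × Int × Int)) (pos : List (String × String)) : Prop :=
  ∀ dep ∈ dependency.drop 1,
    (∃ p ∈ PySem.List.enumerate text_tk 0, p.2 ∈ aspect_vocab ∧ (dep.2.1 = p.1 + 1 ∨ dep.2.2 = p.1 + 1)) →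
      PySem.Raise.InRange pos.length (dep.2.1 - 1) ∧ PySem.Raise.InRange pos.length (dep.2.2 - 1) ∧
      (useful_pos_two_dict.contains ((PySem.List.pyGetD pos (dep.2.1 - 1) ("", "")).2,
                                     (PySem.List.pyGetD pos (dep.2.2 - 1) ("", "")).2) = true →
        PySem.Raise.InRange text_tk.length (dep.2.1 - 1) ∧ PySem.Raise.InRange text_tk.length (dep.2.2 - 1))
instance (text_tk : List String) (aspect_vocab : List String) (dependency : List (String × Int × Int)) (pos : List (String × String)) : Decidable (Pre_get_single_sentence_lables text_tk aspect_vocab dependency pos) := by unfold Pre_get_single_sentence_lables; infer_instance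

def pvWitness_get_single_sentence_lables : List String × List String × (List (String × Int × Int)) × (List (String × String)) :=
  (["food", "good"], ["food"], [("root", 0, 0)], [("food", "NN"), ("good", "JJ")])

def Spec_get_single_sentence_lables (text_tk : List String) (aspect_vocab : List String) (dependency : List (String × Int × Int)) (pos : List (String × String)) (out : List String × List (List Int)) : Prop := out = get_single_sentence_lables_alt text_tk aspect_vocab dependency pos
instance (text_tk : List String) (aspect_vocab : List String) (dependency : List (String × Int × Int)) (pos : List (String × String)) (out : List String × List (List Int)) : Decidable (Spec_get_single_sentence_lables text_tk aspect_vocab dependency pos out) := by unfold Spec_get_single_sentence_lables; infer_instance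

-- ===== CLAIM (what is proved, stated in full; the proofs are below) =====
def Claim_equal_get_single_sentence_lables : Prop := ∀ (text_tk : List String) (aspect_vocab : List String) (dependency : List (String × Int × Int)) (pos : List (String × String)), Dom_get_single_sentence_lables text_tk aspect_vocab dependency pos → Pre_get_single_sentence_lables text_tk aspect_vocab dependency pos → Spec_get_single_sentence_lables text_tk aspect_vocab dependency pos (get_single_sentence_lables text_tk aspect_vocab dependency pos)

-- ===== LEMMAS AND PROOFS =====

-- the incidence list is a flatMap over the edges
lemma gssl_incidences_eq (dependency : List (String × Int × Int)) :
    gssl_incidences dependency =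
      (dependency.drop 1).flatMap (fun dep =>
        (dep.2.1, dep) :: (if dep.2.2 ≠ dep.2.1 then [(dep.2.2, dep)] else [])) := by
  unfold gssl_incidences
  rw [PySem.List.foldl_congr_mem
    (g := fun acc dep => acc ++ ((dep.2.1, dep) :: (if dep.2.2 ≠ dep.2.1 then [(dep.2.2, dep)] else [])))]
  · rw [PySem.List.foldl_append_eq_flatMap]; simp
  · intro acc dep _; dsimp only; split <;> simp

-- filtering the incidence list by node yields exactly the incident edges, in order
lemma gssl_adj_getD (dependency : List (String × Int × Int)) (q : Int) :
    (gssl_adj dependency).getD q [] =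
      (dependency.drop 1).filter (fun dep => dep.2.1 == q || dep.2.2 == q) := by
  unfold gssl_adj
  rw [PySem.Dict.getD_foldl_modify_append, PySem.Dict.getD_empty, gssl_incidences_eq]
  generalize dependency.drop 1 = l
  induction l with
  | nil => simp
  | cons dep t ih =>
    simp only [List.flatMap_cons, List.filter_append, List.map_append, List.filter_cons]
    by_cases h1 : dep.2.1 = q <;> by_cases h2 : dep.2.2 = q <;>
      (first
        | (simp_all [List.filter, List.cons_append, beq_iff_eq]; split <;> simp_all)
        | simp_all [List.filter, List.cons_append, beq_iff_eq])

-- sorting a two-element list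
lemma sorted_pair (a b : Int) :
    PySem.List.sorted [a, b] (fun x => x) false = if a ≤ b then [a, b] else [b, a] := by
  by_cases h : a ≤ b
  · rw [if_pos h]
    exact PySem.List.sorted_id_eq_of_perm_of_pairwise _ _ (List.Perm.refl _) (by simp [h])
  · rw [if_neg h]
    exact PySem.List.sorted_id_eq_of_perm_of_pairwise _ _ (List.Perm.swap _ _ _) (by simp; omega)

lemma set_ofList_contains {α : Type} [BEq α] [LawfulBEq α] (xs : List α) (x : α) :
    (PySem.Set.ofList xs).contains x = xs.contains x := by
  simp [PySem.Set.contains, PySem.Set.mem_ofList]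

-- ===== VERDICT (by name: the statement is the Claim_ definition above) =====
theorem get_single_sentence_lables_spec : Claim_equal_get_single_sentence_lables := by
  intro text_tk aspect_vocab dependency pos _ _
  unfold Spec_get_single_sentence_lables get_single_sentence_lables get_single_sentence_lables_alt
  apply PySem.List.foldl_congr_mem
  intro s p _
  rw [set_ofList_contains]
  by_cases hasp : aspect_vocab.contains p.2
  · rw [if_pos hasp, if_pos hasp, gssl_adj_getD,
      PySem.List.foldl_if_eq_foldl_filter (fun dep : String × Int × Int => dep.2.1 == p.1 + 1 || dep.2.2 == p.1 + 1)]
    apply PySem.List.foldl_congr_mem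
    intro s dep _
    dsimp only
    rw [sorted_pair]
  · rw [if_neg hasp, if_neg hasp]
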